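-- pv_equiv track=rewrite | github.com/imanmousaei/Katan-Algorithm | HW1/a.py | solve
-- ===== SOURCE A (Python) =====
-- def solve(n, t, a):
--     cnt, right_sum = 0, 0
--
--     for right in range(0, n):
--         left = 0
--
--         right_sum += a[right]
--         sum = right_sum
--
--         while left <= right:
--             if sum < t:
--                 cnt += 1
--
--             sum -= a[left]
--             left += 1
--
--     return cnt
-- ===== SOURCE B (Python) =====
-- def solve(n, t, a):
--     # Prefix sums: subarray a[l..r] has sum < t iff P[r+1] - P[l] < t.
--     # Keep the earlier prefix sums in a sorted list; for each new prefix p,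
--     # the subarrays ending here with sum < t are the earlier prefixes q > p - t,
--     # found by binary search instead of an inner rescan.
--     if n <= 0:
--         return 0
--     cnt = 0
--     prefixes = [0]
--     p = 0
--     for x in a[:n]:
--         p += x
--         # lo = number of elements of prefixes that are <= p - t
--         lo, hi = 0, len(prefixes)
--         while lo < hi:
--             mid = lo + (hi - lo) // 2
--             if prefixes[mid] <= p - t:
--                 lo = mid + 1
--             else:
--                 hi = mid
--         cnt += len(prefixes) - lo
--         # insert p keeping prefixes sorted
--         lo, hi = 0, len(prefixes)
--         while lo < hi:
--             mid = lo + (hi - lo) // 2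
--             if prefixes[mid] <= p:
--                 lo = mid + 1
--             else:
--                 hi = mid
--         prefixes.insert(lo, p)
--     return cnt
-- ===== Notes on version B (the rewrite author's own statement) =====
-- stated objective: faster
-- what changed: Replaces A's inner rescan of every subarray ending at each right endpoint by prefix sums kept in a sorted list: for each new prefix sum a hand-written binary search counts the earlier prefixes q with p - q < t, and a second binary search finds the insertion point that keeps the list sorted.
import Mathlib
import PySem

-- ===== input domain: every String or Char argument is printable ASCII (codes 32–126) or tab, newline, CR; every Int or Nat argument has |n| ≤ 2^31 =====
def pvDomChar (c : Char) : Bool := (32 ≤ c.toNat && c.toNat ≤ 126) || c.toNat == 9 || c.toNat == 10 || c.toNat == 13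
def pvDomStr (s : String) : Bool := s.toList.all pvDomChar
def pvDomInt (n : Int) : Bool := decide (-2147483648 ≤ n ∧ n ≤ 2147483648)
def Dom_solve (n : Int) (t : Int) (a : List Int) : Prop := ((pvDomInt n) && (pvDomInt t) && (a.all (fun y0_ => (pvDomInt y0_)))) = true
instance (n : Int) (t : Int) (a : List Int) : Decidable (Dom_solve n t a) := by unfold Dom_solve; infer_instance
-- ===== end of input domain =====

-- B replaces A's quadratic inner rescan by prefix sums kept in a sorted list with binary search (faster).

-- ===== PORT A =====
-- the 'while left <= right' loop of A: counts sums < t, subtracting a[left] each step.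
-- 'fuel' only makes the recursion structural: it bounds the iteration count (right+1-left),
-- which A's loop decreases by exactly 1 per step, so the guard 'left ≤ right' still decides every exit.
def solveInnerGo (t : Int) (a : List Int) (right : Int) : Nat → Int → Int → Int → Int
  | 0, _, _, cnt => cnt
  | fuel + 1, left, s, cnt =>
    if left ≤ right then
      solveInnerGo t a right fuel (left + 1) (s - PySem.List.pyGetD a left 0)
        (if s < t then cnt + 1 else cnt)
    else cnt

def solveInner (t : Int) (a : List Int) (right left s cnt : Int) : Int :=
  solveInnerGo t a right (right + 1 - left).toNat left s cnt

def solve (n : Int) (t : Int) (a : List Int) : Int :=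
  ((PySem.List.pyRange 0 n 1).foldl
    (fun (st : Int × Int) right =>
      let right_sum := st.2 + PySem.List.pyGetD a right 0
      (solveInner t a right 0 right_sum st.1, right_sum))
    (0, 0)).1

-- ===== PORT B =====
-- B's hand-written binary search: least index in [lo,hi) with prefixes[idx] > key.
-- 'fuel' only makes the recursion structural: it bounds hi-lo, which each step shrinks,
-- so the guard 'lo < hi' still decides every exit.
def bsearchGo (prefixes : List Int) (key : Int) : Nat → Int → Int → Int
  | 0, lo, _ => lo
  | fuel + 1, lo, hi =>
    if lo < hi then
      let mid := lo + PySem.Int.floordiv (hi - lo) 2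
      if PySem.List.pyGetD prefixes mid 0 ≤ key then bsearchGo prefixes key fuel (mid + 1) hi
      else bsearchGo prefixes key fuel lo mid
    else lo

def bsearchLE (prefixes : List Int) (key : Int) (lo hi : Int) : Int :=
  bsearchGo prefixes key (hi - lo).toNat lo hi

def solve_alt (n : Int) (t : Int) (a : List Int) : Int :=
  if n ≤ 0 then 0
  else
    ((PySem.List.slice a none (some n)).foldl
      (fun (st : Int × List Int × Int) x =>
        let p := st.2.2 + x
        let lo := bsearchLE st.2.1 (p - t) 0 (st.2.1.length : Int)
        let cnt := st.1 + ((st.2.1.length : Int) - lo)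
        let lo2 := bsearchLE st.2.1 p 0 (st.2.1.length : Int)
        (cnt, PySem.List.insert st.2.1 lo2 p, p))
      (0, [0], 0)).1

-- ===== PRECONDITION & SPEC =====
-- Pre: A indexes a[right] for right in range(n); it raises IndexError iff n > len(a).
def Pre_solve (n : Int) (t : Int) (a : List Int) : Prop := n ≤ (a.length : Int)
instance (n : Int) (t : Int) (a : List Int) : Decidable (Pre_solve n t a) := by unfold Pre_solve; infer_instance
def pvWitness_solve : Int × Int × List Int := (3, 4, [1, 2, 3])

def Spec_solve (n : Int) (t : Int) (a : List Int) (out : Int) : Prop := out = solve_alt n t a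
instance (n : Int) (t : Int) (a : List Int) (out : Int) : Decidable (Spec_solve n t a out) := by unfold Spec_solve; infer_instance

-- ===== CLAIM (what is proved, stated in full; the proofs are below) =====
def Claim_equal_solve : Prop := ∀ (n : Int) (t : Int) (a : List Int), Dom_solve n t a → Pre_solve n t a → Spec_solve n t a (solve n t a)

-- ===== LEMMAS AND PROOFS =====

-- reference count: process l; qs = prefix sums seen so far, p = current prefix sum
def bref (t : Int) (qs : List Int) (p : Int) : List Int → Int
  | [] => 0
  | x :: xs =>
    (↑(qs.countP (fun q => decide ((p + x) - q < t))) : Int) + bref t (qs ++ [p + x]) (p + x) xs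

def qsAfter (qs : List Int) (p : Int) : List Int → List Int
  | [] => qs
  | x :: xs => qsAfter (qs ++ [p + x]) (p + x) xs


-- closed form of A's inner loop count
def innerCnt (t : Int) (m : List Int) (s : Int) : Nat → Int
  | 0 => 0
  | k+1 => (if s < t then 1 else 0) + innerCnt t m.tail (s - m.headD 0) k

lemma pyGetD_drop_headD (a : List Int) (left : Int) (h0 : 0 ≤ left) :
    PySem.List.pyGetD a left 0 = (a.drop left.toNat).headD 0 := by
  have h : left = ((left.toNat : Nat) : Int) := by omega
  have h1 : PySem.List.pyGetD a left 0 = a.getD left.toNat 0 := by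
    rw [h, PySem.List.pyGetD_natCast]
    have h2 : (((left.toNat : Nat) : Int)).toNat = left.toNat := by omega
    rw [h2]
  rw [h1]
  generalize left.toNat = j
  simp only [List.getD]
  rw [← List.head?_drop]
  cases a.drop j <;> simp

lemma solveInnerGo_eq (t : Int) (a : List Int) (right : Int) :
    ∀ (fuel : Nat) (left s cnt : Int), 0 ≤ left → (right + 1 - left).toNat = fuel →
    solveInnerGo t a right fuel left s cnt = cnt + innerCnt t (a.drop left.toNat) s fuel := by
  intro fuel
  induction fuel with
  | zero =>
    intro left s cnt h0 hf
    rw [solveInnerGo]; simp [innerCnt]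
  | succ k ih =>
    intro left s cnt h0 hf
    rw [solveInnerGo, if_pos (by omega)]
    rw [ih (left + 1) _ _ (by omega) (by omega)]
    rw [innerCnt]
    rw [pyGetD_drop_headD a left h0]
    have hdrop : a.drop (left + 1).toNat = (a.drop left.toNat).tail := by
      have h2 : (left + 1).toNat = left.toNat + 1 := by omega
      rw [h2]; exact (List.tail_drop ..).symm
    rw [hdrop]
    split_ifs <;> ring

lemma take_sum_cons (m : List Int) (i : Nat) :
    (m.take (i+1)).sum = m.headD 0 + (m.tail.take i).sum := by
  cases m <;> simp

lemma innerCnt_eq (t : Int) : ∀ (k : Nat) (m : List Int) (s : Int),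
    innerCnt t m s k = (((List.range k).countP (fun i => decide (s - (m.take i).sum < t)) : Nat) : Int) := by
  intro k
  induction k with
  | zero => simp [innerCnt]
  | succ k ih =>
    intro m s
    rw [innerCnt, ih, List.range_succ_eq_map, List.countP_cons, List.countP_map]
    have hc : (List.range k).countP ((fun i => decide (s - (m.take i).sum < t)) ∘ Nat.succ)
        = (List.range k).countP (fun i => decide ((s - m.headD 0) - (m.tail.take i).sum < t)) := by
      apply List.countP_congr
      intro i _
      simp only [Function.comp]
      have := take_sum_cons m i
      by_cases h : s - (m.take (i+1)).sum < t
      · rw [decide_eq_true h, (decide_eq_true (by omega) : decide ((s - m.headD 0) - (m.tail.take i).sum < t) = true)]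
      · rw [decide_eq_false h, (decide_eq_false (by omega) : decide ((s - m.headD 0) - (m.tail.take i).sum < t) = false)]
    rw [hc]
    simp only [List.take_zero, List.sum_nil, sub_zero]
    by_cases h : s < t
    · simp only [if_pos h, decide_eq_true h, if_true]; push_cast; omega
    · simp only [if_neg h, decide_eq_false h]; push_cast; omega

-- characterisation of qsAfter
lemma qsAfter_eq : ∀ (m qs : List Int) (p : Int),
    qsAfter qs p m = qs ++ (List.range m.length).map (fun i => p + (m.take (i+1)).sum) := by
  intro m
  induction m with
  | nil => intro qs p; simp [qsAfter]
  | cons y ys ih =>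
    intro qs p
    rw [qsAfter, ih]
    rw [List.length_cons, List.range_succ_eq_map]
    simp only [List.map_cons, List.map_map, List.append_assoc, List.singleton_append,
      List.take_succ_cons, List.sum_cons, List.take_zero, List.sum_nil, add_zero]
    congr 1
    congr 1
    apply List.map_congr_left
    intro i _
    simp only [Function.comp, Nat.succ_eq_add_one]
    ring

lemma bref_append (t : Int) : ∀ (m qs : List Int) (p x : Int),
    bref t qs p (m ++ [x]) = bref t qs p m
      + (((qsAfter qs p m).countP (fun q => decide ((p + m.sum + x) - q < t)) : Nat) : Int) := by
  intro m
  induction m with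
  | nil => intro qs p x; simp [bref, qsAfter]
  | cons y ys ih =>
    intro qs p x
    rw [List.cons_append, bref, bref, ih, qsAfter]
    have hs : p + (y :: ys).sum + x = (p + y) + ys.sum + x := by
      rw [List.sum_cons]; ring
    rw [hs]; ring

-- ---- binary search correctness ----
lemma sorted_getD_mono (qs : List Int) (hs : qs.Pairwise (· ≤ ·)) (i j : Nat)
    (hij : i ≤ j) (hj : j < qs.length) : qs.getD i 0 ≤ qs.getD j 0 := by
  rw [List.getD_eq_getElem qs 0 (by omega), List.getD_eq_getElem qs 0 hj]
  rcases Nat.lt_or_ge i j with h | h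
  · exact List.pairwise_iff_getElem.mp hs i j (by omega) hj h
  · have hij' : i = j := by omega
    subst hij'; exact le_refl _

lemma countP_of_prefix (qs : List Int) (key : Int) (m : Nat) (hm : m ≤ qs.length)
    (h1 : ∀ i, i < m → qs.getD i 0 ≤ key)
    (h2 : ∀ i, m ≤ i → i < qs.length → key < qs.getD i 0) :
    qs.countP (fun q => decide (q ≤ key)) = m := by
  conv_lhs => rw [← List.take_append_drop m qs]
  rw [List.countP_append]
  have hlen : (qs.take m).length = m := by simp [List.length_take]; omega
  have hA : (qs.take m).countP (fun q => decide (q ≤ key)) = (qs.take m).length := by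
    apply List.countP_eq_length.mpr
    intro q hq
    rcases List.mem_iff_getElem.mp hq with ⟨i, hi, hqi⟩
    have hi' : i < m := by omega
    have : (qs.take m)[i] = qs[i] := List.getElem_take
    have hgd : qs.getD i 0 = qs[i] := List.getD_eq_getElem qs 0 (by omega)
    simp only [decide_eq_true_eq]
    rw [← hqi, this, ← hgd]
    exact h1 i hi'
  have hB : (qs.drop m).countP (fun q => decide (q ≤ key)) = 0 := by
    apply List.countP_eq_zero.mpr
    intro q hq
    rcases List.mem_iff_getElem.mp hq with ⟨i, hi, hqi⟩
    have hlen2 : (qs.drop m).length = qs.length - m := List.length_drop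
    have : (qs.drop m)[i] = qs[m + i] := List.getElem_drop ..
    have hgd : qs.getD (m + i) 0 = qs[m + i] := List.getD_eq_getElem qs 0 (by omega)
    simp only [decide_eq_true_eq, not_le]
    rw [← hqi, this, ← hgd]
    exact h2 (m + i) (by omega) (by omega)
  rw [hA, hB, hlen]
  omega

lemma bs_inv (qs : List Int) (key : Int) (hs : qs.Pairwise (· ≤ ·)) :
    ∀ (fuel : Nat) (lo hi : Int), (hi - lo).toNat ≤ fuel → 0 ≤ lo → lo ≤ hi →
    hi ≤ (qs.length : Int) →
    (∀ i : Nat, (i : Int) < lo → qs.getD i 0 ≤ key) →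
    (∀ i : Nat, hi ≤ (i : Int) → i < qs.length → key < qs.getD i 0) →
    bsearchGo qs key fuel lo hi = ((qs.countP (fun q => decide (q ≤ key)) : Nat) : Int) := by
  intro fuel
  induction fuel with
  | zero =>
    intro lo hi hf h0 hle hhi hlow hhigh
    rw [bsearchGo]
    have hlohi : lo = hi := by omega
    have hcp : qs.countP (fun q => decide (q ≤ key)) = lo.toNat := by
      apply countP_of_prefix qs key lo.toNat (by omega)
      · intro i hi2; exact hlow i (by omega)
      · intro i hi2 hi3; exact hhigh i (by omega) hi3
    rw [hcp]; omega
  | succ fuel ih =>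
    intro lo hi hf h0 hle hhi hlow hhigh
    rw [bsearchGo]
    by_cases hlt : lo < hi
    · rw [if_pos hlt]
      dsimp only
      have hfd := PySem.Int.floordiv_eq_ediv_of_pos (a := hi - lo) (b := 2) (by omega)
      have hmb : lo ≤ lo + PySem.Int.floordiv (hi - lo) 2 ∧
          lo + PySem.Int.floordiv (hi - lo) 2 < hi := by rw [hfd]; omega
      set mid := lo + PySem.Int.floordiv (hi - lo) 2 with hmid
      have hmlen : mid.toNat < qs.length := by omega
      have hmc : mid = ((mid.toNat : Nat) : Int) := by omega
      have hget : PySem.List.pyGetD qs mid 0 = qs.getD mid.toNat 0 := by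
        rw [hmc, PySem.List.pyGetD_natCast]
        have h3 : (((mid.toNat : Nat) : Int)).toNat = mid.toNat := by omega
        rw [h3]
      rw [hget]
      by_cases hc : qs.getD mid.toNat 0 ≤ key
      · rw [if_pos hc]
        apply ih (mid + 1) hi (by omega) (by omega) (by omega) hhi
        · intro i hi2
          have him : i ≤ mid.toNat := by omega
          exact le_trans (sorted_getD_mono qs hs i mid.toNat him hmlen) hc
        · exact hhigh
      · rw [if_neg hc]
        apply ih lo mid (by omega) h0 (by omega) (by omega) hlow
        intro i hi2 hi3
        have := sorted_getD_mono qs hs mid.toNat i (by omega) hi3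
        omega
    · rw [if_neg hlt]
      have hlohi : lo = hi := le_antisymm hle (not_lt.mp hlt)
      have hcp : qs.countP (fun q => decide (q ≤ key)) = lo.toNat := by
        apply countP_of_prefix qs key lo.toNat (by omega)
        · intro i hi2; exact hlow i (by omega)
        · intro i hi2 hi3; exact hhigh i (by omega) hi3
      rw [hcp]; omega

lemma bs_count (qs : List Int) (key : Int) (hs : qs.Pairwise (· ≤ ·)) :
    bsearchLE qs key 0 (qs.length : Int) = ((qs.countP (fun q => decide (q ≤ key)) : Nat) : Int) := by
  rw [bsearchLE]
  apply bs_inv qs key hs _ 0 _ (by omega) (by omega) (by omega) (by omega)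
  · intro i hi2; omega
  · intro i hi2 hi3; omega

-- ---- sorted insert ----
lemma sorted_countP_bounds (qs : List Int) (key : Int) (hs : qs.Pairwise (· ≤ ·)) :
    (∀ q ∈ qs.take (qs.countP (fun q => decide (q ≤ key))), q ≤ key) ∧
    (∀ q ∈ qs.drop (qs.countP (fun q => decide (q ≤ key))), key < q) := by
  induction qs with
  | nil => simp
  | cons y ys ih =>
    have hy : ∀ z ∈ ys, y ≤ z := (List.pairwise_cons.mp hs).1
    have ih' := ih (List.pairwise_cons.mp hs).2
    by_cases hc : y ≤ key
    · rw [List.countP_cons, decide_eq_true hc]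
      simp only [if_pos, List.take_succ_cons, List.drop_succ_cons]
      constructor
      · intro q hq
        rcases List.mem_cons.mp hq with h | h
        · subst h; exact hc
        · exact ih'.1 q h
      · exact ih'.2
    · have hz : ys.countP (fun q => decide (q ≤ key)) = 0 := by
        apply List.countP_eq_zero.mpr
        intro z hzm
        have := hy z hzm
        simp only [decide_eq_true_eq, not_le]
        omega
      rw [List.countP_cons, hz, decide_eq_false hc]
      norm_num
      constructor
      · omega
      · intro q hq
        have := hy q hq
        omega

lemma insert_sorted_perm (qs : List Int) (p : Int) (hs : qs.Pairwise (· ≤ ·)) :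
    (PySem.List.insert qs ((qs.countP (fun q => decide (q ≤ p)) : Nat) : Int) p).Perm (p :: qs) ∧
    (PySem.List.insert qs ((qs.countP (fun q => decide (q ≤ p)) : Nat) : Int) p).Pairwise (· ≤ ·) := by
  set m := qs.countP (fun q => decide (q ≤ p)) with hm
  have hmle : m ≤ qs.length := List.countP_le_length
  rw [PySem.List.insert_natCast qs m p hmle]
  have hb := sorted_countP_bounds qs p hs
  constructor
  · calc (qs.take m ++ p :: qs.drop m).Perm (p :: (qs.take m ++ qs.drop m)) := List.perm_middle
      _ = (p :: qs) := by rw [List.take_append_drop]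
  · rw [List.pairwise_append]
    refine ⟨hs.sublist (List.take_sublist m qs), ?_, ?_⟩
    · rw [List.pairwise_cons]
      refine ⟨fun q hq => le_of_lt (hb.2 q hq), hs.sublist (List.drop_sublist m qs)⟩
    · intro q hq b hb2
      have hqp : q ≤ p := hb.1 q hq
      rcases List.mem_cons.mp hb2 with h | h
      · subst h; exact hqp
      · exact le_trans hqp (le_of_lt (hb.2 b h))

lemma qsAfter_prefixes (a : List Int) (k : Nat) (hk : k ≤ a.length) :
    qsAfter [0] 0 (a.take k) = (List.range (k+1)).map (fun i => (a.take i).sum) := by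
  rw [qsAfter_eq]
  have hlen : (a.take k).length = k := by
    rw [List.length_take]; omega
  rw [hlen, List.range_succ_eq_map, List.map_cons, List.map_map, List.singleton_append]
  simp only [List.take_zero, List.sum_nil]
  congr 1
  apply List.map_congr_left
  intro i hi
  have hik : i < k := List.mem_range.mp hi
  simp only [Function.comp, Nat.succ_eq_add_one]
  rw [List.take_take]
  have hmin : min (i + 1) k = i + 1 := by omega
  rw [hmin]
  ring

-- ---- A's outer loop ----
lemma solveA_eq (t : Int) (a : List Int) : ∀ (k : Nat), k ≤ a.length →
    (PySem.List.pyRange 0 (k : Int) 1).foldl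
      (fun (st : Int × Int) right =>
        let right_sum := st.2 + PySem.List.pyGetD a right 0
        (solveInner t a right 0 right_sum st.1, right_sum))
      (0, 0)
    = (bref t [0] 0 (a.take k), (a.take k).sum) := by
  intro k
  induction k with
  | zero =>
    intro _
    rw [PySem.List.pyRange_one_eq_nil (by omega)]
    simp [bref]
  | succ k ih =>
    intro hk
    have hk' : k ≤ a.length := by omega
    have hklen : k < a.length := by omega
    have hcast : ((k + 1 : Nat) : Int) = (k : Int) + 1 := by push_cast; ring
    rw [hcast, PySem.List.pyRange_one_succ_right (by omega), List.foldl_append, ih hk']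
    simp only [List.foldl_cons, List.foldl_nil]
    have hget : PySem.List.pyGetD a (k : Int) 0 = a[k] := by
      rw [PySem.List.pyGetD_natCast]; exact List.getD_eq_getElem a 0 hklen
    have htake : a.take (k + 1) = a.take k ++ [a[k]] := by
      rw [List.take_add_one]; simp [List.getElem?_eq_getElem hklen]
    have hsum : (a.take (k + 1)).sum = (a.take k).sum + a[k] := List.sum_take_succ a k hklen
    have hinner := solveInnerGo_eq t a (k : Int) (k + 1) 0 ((a.take k).sum + a[k])
      (bref t [0] 0 (a.take k)) (by omega) (by omega)
    have hfz : (((k : Int)) + 1 - 0).toNat = k + 1 := by omega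
    rw [hget, solveInner, hfz, hinner]
    rw [innerCnt_eq]
    simp only [Int.toNat_zero, List.drop_zero]
    rw [Prod.mk.injEq]
    refine ⟨?_, ?_⟩
    · rw [htake, bref_append, qsAfter_prefixes a k hk']
      rw [List.countP_map]
      congr 2
      apply List.countP_congr
      intro i hi
      simp only [Function.comp, decide_eq_true_eq]
      constructor <;> intro <;> omega
    · rw [hsum]

-- ---- B's fold ----
lemma foldB (t : Int) : ∀ (l : List Int) (cnt p : Int) (qs qs' : List Int),
    qs'.Perm qs → qs'.Pairwise (· ≤ ·) →
    (l.foldl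
      (fun (st : Int × List Int × Int) x =>
        let p := st.2.2 + x
        let lo := bsearchLE st.2.1 (p - t) 0 (st.2.1.length : Int)
        let cnt := st.1 + ((st.2.1.length : Int) - lo)
        let lo2 := bsearchLE st.2.1 p 0 (st.2.1.length : Int)
        (cnt, PySem.List.insert st.2.1 lo2 p, p))
      (cnt, qs', p)).1 = cnt + bref t qs p l := by
  intro l
  induction l with
  | nil => intro cnt p qs qs' _ _; simp [bref]
  | cons x xs ih =>
    intro cnt p qs qs' hperm hsort
    rw [List.foldl_cons, bref]
    simp only
    rw [bs_count qs' (p + x - t) hsort, bs_count qs' (p + x) hsort]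
    have hip := insert_sorted_perm qs' (p + x) hsort
    have hperm2 : (PySem.List.insert qs' ((qs'.countP (fun q => decide (q ≤ p + x)) : Nat) : Int) (p + x)).Perm (qs ++ [p + x]) := by
      exact hip.1.trans ((hperm.cons (p + x)).trans (List.perm_append_singleton (p + x) qs).symm)
    rw [ih _ _ (qs ++ [p + x]) _ hperm2 hip.2]
    have hcnt : ((qs'.length : Int) - ((qs'.countP (fun q => decide (q ≤ p + x - t)) : Nat) : Int))
        = ((qs.countP (fun q => decide (p + x - q < t)) : Nat) : Int) := by
      have hsplit := qs'.length_eq_countP_add_countP (fun q => decide (q ≤ p + x - t))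
      have hnot : qs'.countP (fun a => decide ¬(decide (a ≤ p + x - t) = true))
          = qs'.countP (fun q => decide (p + x - q < t)) := by
        apply List.countP_congr
        intro q _
        by_cases h : p + x - q < t
        · rw [decide_eq_true h, decide_eq_true (by simp; omega)]
        · rw [decide_eq_false h, decide_eq_false (by simp; omega)]
      have hpc : qs'.countP (fun q => decide (p + x - q < t)) = qs.countP (fun q => decide (p + x - q < t)) :=
        hperm.countP_eq _
      omega
    rw [hcnt]
    ring

-- ===== VERDICT (by name: the statement is the Claim_ definition above) =====
theorem solve_spec : Claim_equal_solve := by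
  intro n t a _ hpre
  unfold Spec_solve
  unfold Pre_solve at hpre
  by_cases hn : n ≤ 0
  · rw [solve, solve_alt, if_pos hn, PySem.List.pyRange_one_eq_nil hn]
    simp
  · have hk : n = ((n.toNat : Nat) : Int) := by omega
    have hk' : n.toNat ≤ a.length := by omega
    rw [solve, solve_alt, if_neg hn]
    rw [hk, solveA_eq t a n.toNat hk']
    rw [PySem.List.slice_to_natCast]
    rw [foldB t (a.take n.toNat) 0 0 [0] [0] (List.Perm.refl _) (by simp)]
    simp
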